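-- pv_equiv track=rewrite | github.com/KaneOrca/ClawSeat | core/skills/memory-oracle/scripts/query_memory.py | _split_markdown_front_matter
-- ===== SOURCE A (Python) =====
-- def _split_markdown_front_matter(text: str) -> tuple[dict[str, str], str]:
--     lines = text.splitlines()
--     if not lines or lines[0].strip() != "---":
--         return {}, text
--     meta: dict[str, str] = {}
--     for i in range(1, len(lines)):
--         line = lines[i]
--         if line.strip() == "---":
--             return meta, "\n".join(lines[i + 1:])
--         if not line.strip():
--             continue
--         key, sep, value = line.partition(":")
--         if sep:
--             meta[key.strip()] = value.strip()
--     return {}, text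
-- ===== SOURCE B (Python) =====
-- def _split_markdown_front_matter(text: str) -> tuple[dict[str, str], str]:
--     lines = text.splitlines()
--     if not lines or lines[0].strip() != "---":
--         return {}, text
--     rest = lines[1:]
--     j = next((i for i, line in enumerate(rest) if line.strip() == "---"), None)
--     if j is None:
--         return {}, text
--     meta = {k.strip(): v.strip()
--             for k, sep, v in (line.partition(":") for line in rest[:j])
--             if sep}
--     return meta, "\n".join(rest[j + 1:])
-- ===== Notes on version B (the rewrite author's own statement) =====
-- stated objective: simpler
-- what changed: A interleaves delimiter search and key collection in one index loop; B first locates the closing delimiter line, then builds the dict from the enclosed lines with a single comprehension (the blank-line skip disappears: a whitespace-only line has no colon and is filtered by the partition separator test), and joins the remainder as the body.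
import Mathlib
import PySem

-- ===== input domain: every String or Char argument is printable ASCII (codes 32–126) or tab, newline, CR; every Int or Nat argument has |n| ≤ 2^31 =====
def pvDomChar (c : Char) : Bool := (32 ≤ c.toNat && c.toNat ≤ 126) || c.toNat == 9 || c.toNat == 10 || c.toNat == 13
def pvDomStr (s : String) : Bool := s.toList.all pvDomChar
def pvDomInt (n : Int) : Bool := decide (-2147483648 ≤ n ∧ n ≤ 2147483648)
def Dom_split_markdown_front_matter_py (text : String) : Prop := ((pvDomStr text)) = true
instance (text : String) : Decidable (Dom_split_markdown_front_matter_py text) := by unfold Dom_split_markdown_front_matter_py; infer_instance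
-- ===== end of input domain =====

-- B replaces A's single index loop (which interleaves delimiter search and key collection) by
-- locating the closing delimiter first and then building the dict from the enclosed lines in one
-- comprehension; objective: simpler two-phase decomposition, same cost.

-- str.partition(":") on the char list: first ':' splits; none = no ':' present (exact)
def partColon : List Char → Option (List Char × List Char)
  | [] => none
  | c :: rest =>
    if c = ':' then some ([], rest)
    else (partColon rest).map (fun p => (c :: p.1, p.2))

-- str.partition(":") : (head, sep-found?, tail) (exact)
def pyPartitionColon (s : String) : String × Bool × String :=
  match partColon s.toList with
  | some (a, b) => (String.ofList a, true, String.ofList b)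
  | none => (s, false, "")

-- ===== PORT A =====
def loopA (text : String) (md : PySem.Dict String String) :
    List String → (List (String × String)) × String
  | [] => ([], text)
  | line :: rest =>
    if PySem.Str.strip line = "---" then
      (md.items, PySem.Str.join "\n" rest)
    else if PySem.Str.strip line = "" then
      loopA text md rest
    else
      let p := pyPartitionColon line
      if p.2.1 then
        loopA text (md.insert (PySem.Str.strip p.1) (PySem.Str.strip p.2.2)) rest
      else
        loopA text md rest

def split_markdown_front_matter_py (text : String) : (List (String × String)) × String :=
  let lines := PySem.Str.splitlines text
  match lines with
  | [] => ([], text)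
  | l0 :: rest =>
    if PySem.Str.strip l0 ≠ "---" then ([], text)
    else loopA text PySem.Dict.empty rest

-- ===== PORT B =====
-- one dict-comprehension step: add line's key/value when ':' occurs in it
def stepB (d : PySem.Dict String String) (line : String) : PySem.Dict String String :=
  let p := pyPartitionColon line
  if p.2.1 then d.insert (PySem.Str.strip p.1) (PySem.Str.strip p.2.2) else d

def split_markdown_front_matter_py_alt (text : String) : (List (String × String)) × String :=
  let lines := PySem.Str.splitlines text
  match lines with
  | [] => ([], text)
  | l0 :: rest =>
    if PySem.Str.strip l0 ≠ "---" then ([], text)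
    else
      match rest.findIdx? (fun l => PySem.Str.strip l == "---") with
      | none => ([], text)
      | some j =>
        (((rest.take j).foldl stepB PySem.Dict.empty).items,
         PySem.Str.join "\n" (rest.drop (j + 1)))

-- ===== PRECONDITION & SPEC =====
def Spec_split_markdown_front_matter_py (text : String) (out : (List (String × String)) × String) : Prop := out = split_markdown_front_matter_py_alt text
instance (text : String) (out : (List (String × String)) × String) : Decidable (Spec_split_markdown_front_matter_py text out) := by unfold Spec_split_markdown_front_matter_py; infer_instance

-- ===== CLAIM (what is proved, stated in full; the proofs are below) =====
def Claim_equal_split_markdown_front_matter_py : Prop := ∀ (text : String), Dom_split_markdown_front_matter_py text → Spec_split_markdown_front_matter_py text (split_markdown_front_matter_py text)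

-- ===== LEMMAS AND PROOFS =====

lemma partColon_eq_none_iff (cs : List Char) : partColon cs = none ↔ ':' ∉ cs := by
  induction cs with
  | nil => simp [partColon]
  | cons c rest ih =>
    by_cases hc : c = ':'
    · simp [partColon, hc]
    · simp [partColon, hc, Option.map_eq_none_iff, ih, Ne.symm hc]

-- a line whose strip() is empty is all whitespace, hence contains no ':'
lemma stepB_of_strip_empty (d : PySem.Dict String String) (line : String)
    (h : PySem.Str.strip line = "") : stepB d line = d := by
  have hnil : PySem.Chars.strip line.toList = [] := by
    have := congrArg String.toList h
    simpa [PySem.Str.toList_strip] using this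
  have hall : ∀ c ∈ line.toList, PySem.Chars.isspace c = true := by
    intro c hm
    unfold PySem.Chars.strip PySem.Chars.rstrip PySem.Chars.lstrip at hnil
    have hrev : List.dropWhile PySem.Chars.isspace
        (List.dropWhile PySem.Chars.isspace line.toList).reverse = [] := by
      by_contra hne
      exact hne (by simpa using congrArg List.reverse hnil)
    have hsplit := List.takeWhile_append_dropWhile (p := PySem.Chars.isspace) (l := line.toList)
    rw [← hsplit] at hm
    rcases List.mem_append.mp hm with h1 | h2
    · exact List.mem_takeWhile_imp h1
    · have : c ∈ (List.dropWhile PySem.Chars.isspace line.toList).reverse := by simpa using h2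
      exact List.mem_takeWhile_imp (l := (List.dropWhile PySem.Chars.isspace line.toList).reverse)
        (by rw [← List.takeWhile_append_dropWhile (p := PySem.Chars.isspace)
                  (l := (List.dropWhile PySem.Chars.isspace line.toList).reverse)] at this
            simpa [hrev] using this)
  have hnc : ':' ∉ line.toList := by
    intro hm
    have := hall ':' hm
    simp [PySem.Chars.isspace] at this
  have hpart : partColon line.toList = none := (partColon_eq_none_iff _).mpr hnc
  simp [stepB, pyPartitionColon, hpart]

lemma loopA_eq (text : String) (rest : List String) :
    ∀ md : PySem.Dict String String,
    loopA text md rest =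
      match rest.findIdx? (fun l => PySem.Str.strip l == "---") with
      | none => ([], text)
      | some j => (((rest.take j).foldl stepB md).items,
                   PySem.Str.join "\n" (rest.drop (j + 1))) := by
  induction rest with
  | nil => intro md; simp [loopA]
  | cons line rest ih =>
    intro md
    by_cases hc : PySem.Str.strip line = "---"
    · simp [loopA, hc, List.findIdx?_cons]
    · have hstep : loopA text md (line :: rest) = loopA text (stepB md line) rest := by
        by_cases hb : PySem.Str.strip line = ""
        · rw [stepB_of_strip_empty md line hb]
          simp [loopA, hb]
        · simp only [loopA, hc, hb, if_false, stepB]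
          split <;> rfl
      rw [hstep, ih]
      simp only [List.findIdx?_cons, hc, beq_iff_eq, if_false]
      cases h : rest.findIdx? (fun l => PySem.Str.strip l == "---") with
      | none => simp
      | some j => simp [List.take_succ_cons, List.drop_succ_cons]

-- ===== VERDICT (by name: the statement is the Claim_ definition above) =====
theorem split_markdown_front_matter_py_spec : Claim_equal_split_markdown_front_matter_py := by
  intro text _
  unfold Spec_split_markdown_front_matter_py
  unfold split_markdown_front_matter_py split_markdown_front_matter_py_alt
  cases h : PySem.Str.splitlines text with
  | nil => rfl
  | cons l0 rest =>
    by_cases h0 : PySem.Str.strip l0 ≠ "---"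
    · simp [h0]
    · simp only [h0, if_false, loopA_eq]
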